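-- pv_equiv track=rewrite | github.com/bmorales00/Practice-Questions | Python/Leetcode_Python/TwoPointers/ApplyOperations.py | applyOperation
-- ===== SOURCE A (Python) =====
-- from typing import List
--
-- def applyOperation(nums: List[int]) -> List[int]:
--     if not nums:
--         return []
--
--     i = 0
--     s = len(nums)
--     if s == 1:
--         return nums
--     left = []
--     right = []
--
--     while i < s:
--         if nums[i] == 0:
--             right.append(nums[i])
--             i += 1
--         elif i == s - 1:
--             left.append(nums[i])
--             i += 1
--         elif nums[i] == nums[i + 1]:
--             left.append(nums[i] * 2)
--             right.append(0)
--             i += 2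
--         else:
--             left.append(nums[i])
--             i += 1
--
--     return left + right
-- ===== SOURCE B (Python) =====
-- from typing import List
--
-- def applyOperation(nums: List[int]) -> List[int]:
--     arr = list(nums)
--     for i in range(len(arr) - 1):
--         if arr[i] == arr[i + 1]:
--             arr[i] *= 2
--             arr[i + 1] = 0
--     kept = [x for x in arr if x != 0]
--     return kept + [0] * (len(nums) - len(kept))
-- ===== Notes on version B (the rewrite author's own statement) =====
-- stated objective: idiomatic
-- what changed: Replaces A's variable-step single pass that grows separate left/right lists with the canonical two-pass form: an in-place forward pass doubling equal adjacent pairs, then a compaction pass keeping non-zeros and padding zeros by count.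
import Mathlib
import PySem

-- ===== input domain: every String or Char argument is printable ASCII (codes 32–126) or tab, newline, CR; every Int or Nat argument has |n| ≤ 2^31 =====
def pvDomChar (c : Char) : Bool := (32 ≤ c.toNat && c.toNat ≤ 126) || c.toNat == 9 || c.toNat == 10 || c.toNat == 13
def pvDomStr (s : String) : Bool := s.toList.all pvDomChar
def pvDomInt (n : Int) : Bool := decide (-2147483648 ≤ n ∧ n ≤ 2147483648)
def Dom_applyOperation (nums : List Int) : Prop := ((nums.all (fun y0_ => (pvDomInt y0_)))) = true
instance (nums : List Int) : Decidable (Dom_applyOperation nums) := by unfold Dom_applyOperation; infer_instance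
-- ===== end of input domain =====

-- B replaces A's variable-step left/right pass with the canonical apply-pass + compact-pass (idiomatic; same cost).

-- ===== PORT A =====
-- A's while loop: index i scans nums advancing by 1 or 2, appending to left/right.
def aGo : List Int → List Int → List Int → List Int × List Int
  | [], left, right => (left, right)
  | x :: rest, left, right =>
    if x = 0 then aGo rest left (right ++ [x])
    else match rest with
      | [] => (left ++ [x], right)
      | y :: rest' =>
        if x = y then aGo rest' (left ++ [x * 2]) (right ++ [0])
        else aGo (y :: rest') (left ++ [x]) right

def applyOperation (nums : List Int) : List Int :=
  if nums = [] then []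
  else if nums.length = 1 then nums
  else
    let p := aGo nums [] []
    p.1 ++ p.2

-- ===== PORT B =====
-- B's first pass: for i in range(len-1): if arr[i]==arr[i+1]: arr[i]*=2; arr[i+1]=0
def bApply : List Int → List Int
  | x :: y :: rest =>
    if x = y then (x * 2) :: bApply (0 :: rest) else x :: bApply (y :: rest)
  | l => l
termination_by l => l.length

def applyOperation_alt (nums : List Int) : List Int :=
  let arr := bApply nums
  let kept := arr.filter (fun x => x != 0)
  kept ++ List.replicate (nums.length - kept.length) 0

-- ===== PRECONDITION & SPEC =====
def Spec_applyOperation (nums : List Int) (out : List Int) : Prop := out = applyOperation_alt nums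
instance (nums : List Int) (out : List Int) : Decidable (Spec_applyOperation nums out) := by unfold Spec_applyOperation; infer_instance

-- ===== CLAIM (what is proved, stated in full; the proofs are below) =====
def Claim_equal_applyOperation : Prop := ∀ (nums : List Int), Dom_applyOperation nums → Spec_applyOperation nums (applyOperation nums)

-- ===== LEMMAS AND PROOFS =====

theorem bApply_zero_cons (rest : List Int) : bApply (0 :: rest) = 0 :: bApply rest := by
  match rest with
  | [] => simp [bApply]
  | y :: r' =>
    by_cases h : (0 : Int) = y
    · subst h; simp [bApply]
    · simp [bApply, h]

theorem kept_length_le (xs : List Int) :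
    (List.filter (fun x => x != 0) (bApply xs)).length ≤ xs.length := by
  fun_induction bApply xs with
  | case1 y rest ih =>
    rw [bApply_zero_cons] at ih ⊢
    simp only [List.filter_cons] at *
    split <;> simp_all <;> omega
  | case2 x y rest h ih =>
    simp only [List.filter_cons] at *
    split <;> simp_all <;> omega
  | case3 l h =>
    exact List.length_filter_le _ _

-- Main loop invariant: A's loop from any accumulators equals B's kept + zeros form.
theorem rep_pull (n k : Nat) (h : k ≤ n) :
    (0 : Int) :: List.replicate (n - k) 0 = List.replicate (n + 1 - k) 0 := by
  rw [show n + 1 - k = (n - k) + 1 from by omega, List.replicate_succ]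

theorem aGo_eq (xs left right : List Int) :
    aGo xs left right =
      (left ++ List.filter (fun x => x != 0) (bApply xs),
       right ++ List.replicate (xs.length - (List.filter (fun x => x != 0) (bApply xs)).length) 0) := by
  fun_induction aGo xs left right with
  | case1 l r => simp [bApply]
  | case2 rest l r ih =>
    rw [ih, bApply_zero_cons]
    have hle := kept_length_le rest
    simp only [List.filter_cons]
    norm_num
    exact rep_pull _ _ hle
  | case3 x l r hx =>
    simp [bApply, List.filter, hx]
  | case4 l r y rest' hy ih =>
    rw [ih]
    have hy2 : (y * 2 != 0) = true := by simp; omega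
    have hle := kept_length_le rest'
    rw [show bApply (y :: y :: rest') = (y * 2) :: bApply (0 :: rest') from by simp [bApply],
        bApply_zero_cons]
    simp only [List.filter_cons, hy2]
    norm_num
    rw [show rest'.length + 1 + 1 - ((List.filter (fun x => x != 0) (bApply rest')).length + 1)
          = rest'.length + 1 - (List.filter (fun x => x != 0) (bApply rest')).length from by omega]
    exact rep_pull _ _ hle
  | case5 x l r hx y rest' hxy ih =>
    rw [ih]
    rw [show bApply (x :: y :: rest') = x :: bApply (y :: rest') from by simp [bApply, hxy]]
    have hx2 : (x != 0) = true := by simpa using hx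
    simp only [List.filter_cons, hx2]
    simp

-- ===== VERDICT (by name: the statement is the Claim_ definition above) =====
theorem applyOperation_spec : Claim_equal_applyOperation := by
  intro nums _
  show applyOperation nums = applyOperation_alt nums
  match nums with
  | [] => simp [applyOperation, applyOperation_alt, bApply]
  | [x] =>
    by_cases h : x = 0
    · subst h; simp [applyOperation, applyOperation_alt, bApply, List.filter]
    · simp [applyOperation, applyOperation_alt, bApply, List.filter, h]
  | x :: y :: rest =>
    simp only [applyOperation, applyOperation_alt]
    rw [aGo_eq]
    simp
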